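-- pv_equiv track=rewrite | github.com/TataSatyaPratheek/good_old_eda | pipelines/pipeline_orchestrator.py | _create_dependency_execution_queue
-- ===== SOURCE A (Python) =====
-- from typing import Dict, List, Optional, Any, Tuple, Union
--
-- def _create_dependency_execution_queue(pipeline_names: List[str]) -> List[List[str]]:
--     """Create execution queue based on dependencies"""
--     try:
--         # Simple topological sort for demonstration
--         # In production, would use more sophisticated dependency resolution
--
--         dependency_levels = {
--             'eda_pipeline': 0,
--             'feature_pipeline': 1,
--             'competitive_pipeline': 1,
--             'modeling_pipeline': 2,
--             'optimization_pipeline': 3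
--         }
--
--         # Group by dependency level
--         levels = {}
--         for pipeline in pipeline_names:
--             level = dependency_levels.get(pipeline, 0)
--             if level not in levels:
--                 levels[level] = []
--             levels[level].append(pipeline)
--
--         # Return ordered execution batches
--         return [levels[level] for level in sorted(levels.keys())]
--
--     except Exception:
--         # Fallback to sequential execution
--         return [[pipeline] for pipeline in pipeline_names]
-- ===== SOURCE B (Python) =====
-- from typing import List
--
--
-- def _create_dependency_execution_queue(pipeline_names: List[str]) -> List[List[str]]:
--     """Create execution queue based on dependencies"""
--     try:
--         dependency_levels = {
--             'eda_pipeline': 0,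
--             'feature_pipeline': 1,
--             'competitive_pipeline': 1,
--             'modeling_pipeline': 2,
--             'optimization_pipeline': 3
--         }
--
--         # Distinct levels actually present, then one scan of the list per level:
--         # outer loop over sorted levels, inner filter preserves input order.
--         present = {dependency_levels.get(p, 0) for p in pipeline_names}
--         return [
--             [p for p in pipeline_names if dependency_levels.get(p, 0) == level]
--             for level in sorted(present)
--         ]
--     except Exception:
--         return [[p] for p in pipeline_names]
-- ===== Notes on version B (the rewrite author's own statement) =====
-- stated objective: alternative
-- what changed: Inverts the loop nesting: instead of one pass accumulating a level->bucket dict and sorting its keys, B computes the set of distinct levels present, iterates over them in sorted order, and builds each batch by filtering the full input list; no intermediate bucket dict is maintained.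
import Mathlib
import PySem

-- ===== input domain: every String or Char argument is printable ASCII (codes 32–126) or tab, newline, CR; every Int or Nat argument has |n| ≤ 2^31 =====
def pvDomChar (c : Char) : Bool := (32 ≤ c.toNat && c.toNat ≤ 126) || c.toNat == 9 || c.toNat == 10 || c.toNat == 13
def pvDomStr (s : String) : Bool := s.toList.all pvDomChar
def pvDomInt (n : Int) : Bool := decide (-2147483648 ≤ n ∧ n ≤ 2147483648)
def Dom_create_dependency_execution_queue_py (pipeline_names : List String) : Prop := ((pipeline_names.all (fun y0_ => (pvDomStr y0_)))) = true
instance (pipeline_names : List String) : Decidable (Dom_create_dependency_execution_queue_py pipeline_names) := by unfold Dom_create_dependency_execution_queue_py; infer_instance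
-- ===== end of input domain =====

-- B inverts A's loop nesting: sorted distinct levels outside, a filter scan of the input per level, instead of A's one-pass bucket dict; same return value, no speed claim.


-- ===== PORT A =====
def pvDepLevelsA : PySem.Dict String Int :=
  PySem.Dict.ofList [("eda_pipeline", 0), ("feature_pipeline", 1), ("competitive_pipeline", 1),
    ("modeling_pipeline", 2), ("optimization_pipeline", 3)]

-- one iteration of A's grouping loop: `if level not in levels: levels[level] = []` then append
def pvStepA (acc : PySem.Dict Int (List String)) (p : String) : PySem.Dict Int (List String) :=
  let level := pvDepLevelsA.getD p 0
  let acc' := if acc.contains level then acc else acc.insert level ([] : List String)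
  acc'.insert level (acc'.getD level [] ++ [p])

-- the try-body never raises in Lean semantics, so the `except` fallback is unreachable
def create_dependency_execution_queue_py (pipeline_names : List String) : List (List String) :=
  let levels := pipeline_names.foldl pvStepA PySem.Dict.empty
  (PySem.List.sorted levels.keys (fun x => x) false).map (fun level => levels.getD level [])

-- ===== PORT B =====
def pvDepLevelsB : PySem.Dict String Int :=
  PySem.Dict.ofList [("eda_pipeline", 0), ("feature_pipeline", 1), ("competitive_pipeline", 1),
    ("modeling_pipeline", 2), ("optimization_pipeline", 3)]

def create_dependency_execution_queue_py_alt (pipeline_names : List String) : List (List String) :=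
  let present : PySem.Set Int := PySem.Set.ofList (pipeline_names.map (fun p => pvDepLevelsB.getD p 0))
  (PySem.List.sorted present (fun x => x) false).map
    (fun level => pipeline_names.filter (fun p => pvDepLevelsB.getD p 0 == level))


-- ===== PRECONDITION & SPEC =====
def Spec_create_dependency_execution_queue_py (pipeline_names : List String) (out : List (List String)) : Prop := out = create_dependency_execution_queue_py_alt pipeline_names
instance (pipeline_names : List String) (out : List (List String)) : Decidable (Spec_create_dependency_execution_queue_py pipeline_names out) := by unfold Spec_create_dependency_execution_queue_py; infer_instance

-- ===== CLAIM (what is proved, stated in full; the proofs are below) =====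
def Claim_equal_create_dependency_execution_queue_py : Prop := ∀ (pipeline_names : List String), Dom_create_dependency_execution_queue_py pipeline_names → Spec_create_dependency_execution_queue_py pipeline_names (create_dependency_execution_queue_py pipeline_names)

-- ===== LEMMAS AND PROOFS =====

-- keys of A's loop: the distinct levels in first-occurrence order, starting from acc.keys
lemma keysA_foldl (xs : List String) (acc : PySem.Dict Int (List String)) :
    (xs.foldl pvStepA acc).keys = xs.foldl (fun s p => PySem.Set.add s (pvDepLevelsA.getD p 0)) acc.keys := by
  induction xs generalizing acc with
  | nil => rfl
  | cons x xs ih =>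
      simp only [List.foldl_cons, ih]
      congr 1
      show (pvStepA acc x).keys = PySem.Set.add acc.keys (pvDepLevelsA.getD x 0)
      unfold pvStepA
      by_cases h : acc.contains (pvDepLevelsA.getD x 0) = true
      · simp only [h, if_pos]
        rw [PySem.Dict.keys_insert_of_contains _ _ h,
          PySem.Set.add_of_mem ((PySem.Dict.contains_iff_mem_keys _ _).mp h)]
      · simp only [h, if_neg, Bool.not_eq_true]
        rw [PySem.Dict.keys_insert_of_contains _ _ (by simp [PySem.Dict.contains_insert_self]),
          PySem.Dict.keys_insert_of_not_contains _ _ (by simpa using h),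
          PySem.Set.add_of_not_mem (fun hm => h ((PySem.Dict.contains_iff_mem_keys _ _).mpr hm))]

-- values of A's loop: the bucket at `l` is acc's bucket followed by the matching pipelines
lemma getDA_foldl (xs : List String) (acc : PySem.Dict Int (List String)) (l : Int) :
    (xs.foldl pvStepA acc).getD l [] =
      acc.getD l [] ++ xs.filter (fun p => pvDepLevelsA.getD p 0 == l) := by
  induction xs generalizing acc with
  | nil => simp
  | cons x xs ih =>
      simp only [List.foldl_cons, List.filter_cons, ih]
      have hstep : (pvStepA acc x).getD l [] =
          acc.getD l [] ++ (if pvDepLevelsA.getD x 0 == l then [x] else []) := by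
        unfold pvStepA
        by_cases h : acc.contains (pvDepLevelsA.getD x 0) = true
        · simp only [h, if_pos]
          rw [PySem.Dict.getD_insert]
          by_cases hl : l = pvDepLevelsA.getD x 0
          · simp [hl]
          · simp [hl, Ne.symm hl]
        · simp only [h, if_neg, Bool.not_eq_true]
          rw [PySem.Dict.getD_insert]
          by_cases hl : l = pvDepLevelsA.getD x 0
          · rw [if_pos hl, PySem.Dict.getD_insert_self, hl,
              PySem.Dict.getD_of_not_contains _ _ (by simpa using h)]
            simp
          · rw [if_neg hl, PySem.Dict.getD_insert_of_ne _ _ _ hl,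
              if_neg (by simpa using fun hx : pvDepLevelsA.getD x 0 = l => hl hx.symm)]
            simp
      rw [hstep]
      by_cases hc : pvDepLevelsA.getD x 0 == l
      · simp [hc]
      · simp [show (pvDepLevelsA.getD x 0 == l) = false by simpa using hc]

-- ===== VERDICT (by name: the statement is the Claim_ definition above) =====
theorem create_dependency_execution_queue_py_spec : Claim_equal_create_dependency_execution_queue_py := by
  intro pipeline_names _
  unfold Spec_create_dependency_execution_queue_py
  unfold create_dependency_execution_queue_py create_dependency_execution_queue_py_alt
  have hkeys : (pipeline_names.foldl pvStepA PySem.Dict.empty).keys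
      = PySem.Set.ofList (pipeline_names.map (fun p => pvDepLevelsB.getD p 0)) := by
    rw [keysA_foldl]
    rw [PySem.Set.ofList_eq_foldl, List.foldl_map]
    rfl
  simp only [hkeys]
  apply List.map_congr_left
  intro l _
  rw [getDA_foldl]
  simp [PySem.Dict.getD_empty]
  rfl
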